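-- pv_equiv track=rewrite | github.com/Lingxianwen/NeuPRE | DynPRE-raw/DynPRE/DynPRE.py | get_diff_without_rand
-- ===== SOURCE A (Python) =====
-- from typing import Dict, List, Optional, Tuple
--
-- def get_diff_without_rand(
--     s1, s2, exclude_ranges: List[Tuple]
-- ) -> List:  # Ensure s1 and s2 are of the same length
--     no_zero_index = []
--     original_diff = [a ^ b for (a, b) in zip(s1, s2)]
--     for i, c in enumerate(original_diff):
--         if c != 0:
--             flag = False
--             for r in exclude_ranges:
--                 if r[0] <= i <= r[1]:
--                     flag = True
--                     break
--             if not flag: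
--                 no_zero_index.append(i)
--     return no_zero_index
-- ===== SOURCE B (Python) =====
-- def get_diff_without_rand(s1, s2, exclude_ranges):
--     # Precompute the excluded index set once (clamped to [0, n)), then one scan.
--     n = min(len(s1), len(s2))
--     excluded = set()
--     for r in exclude_ranges:
--         excluded.update(range(max(r[0], 0), min(r[1], n - 1) + 1))
--     return [i for i in range(n) if s1[i] != s2[i] and i not in excluded]
-- ===== Notes on version B (the rewrite author's own statement) =====
-- stated objective: faster
-- what changed: B precomputes the set of excluded indices once (each range clamped to the valid index window) and then emits differing indices in a single scan with O(1) set-membership tests, instead of rescanning the whole exclude-range list for every differing index.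
-- outside the precondition, e.g. on get_diff_without_rand([0], [0], [()]): A returns [], B raises IndexError
import Mathlib
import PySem

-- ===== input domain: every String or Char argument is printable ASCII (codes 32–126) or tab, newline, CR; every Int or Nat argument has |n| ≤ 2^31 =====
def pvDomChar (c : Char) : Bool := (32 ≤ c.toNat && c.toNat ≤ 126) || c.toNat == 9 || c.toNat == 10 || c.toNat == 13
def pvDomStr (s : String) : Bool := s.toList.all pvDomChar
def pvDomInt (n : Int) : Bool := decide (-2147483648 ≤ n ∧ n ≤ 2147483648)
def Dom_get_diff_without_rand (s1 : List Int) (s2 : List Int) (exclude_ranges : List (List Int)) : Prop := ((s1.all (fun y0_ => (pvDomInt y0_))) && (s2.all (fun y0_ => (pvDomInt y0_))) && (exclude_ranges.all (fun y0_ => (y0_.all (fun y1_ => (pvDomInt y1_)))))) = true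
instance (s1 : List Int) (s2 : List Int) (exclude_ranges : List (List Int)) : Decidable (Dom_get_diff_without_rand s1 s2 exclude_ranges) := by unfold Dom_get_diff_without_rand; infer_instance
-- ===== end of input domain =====

-- B precomputes the set of excluded indices once (clamped to the valid index window) and then
-- filters index range in one pass, instead of rescanning all exclude ranges for every differing index.


-- ===== PORT A =====
def get_diff_without_rand (s1 : List Int) (s2 : List Int) (exclude_ranges : List (List Int)) : List Int :=
  let original_diff := (s1.zip s2).map (fun p => Int.xor p.1 p.2)
  (PySem.List.enumerate original_diff).foldl
    (fun acc ic =>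
      if ic.2 ≠ 0 then
        if exclude_ranges.any
            (fun r => decide (PySem.List.pyGetD r 0 0 ≤ ic.1) && decide (ic.1 ≤ PySem.List.pyGetD r 1 0)) then
          acc
        else acc ++ [ic.1]
      else acc) []

-- ===== PORT B =====
def get_diff_without_rand_alt (s1 : List Int) (s2 : List Int) (exclude_ranges : List (List Int)) : List Int :=
  let n : Int := min s1.length s2.length
  let excluded : PySem.Set Int :=
    exclude_ranges.foldl
      (fun s r =>
        PySem.Set.update s
          (PySem.List.pyRange (max (PySem.List.pyGetD r 0 0) 0)
            (min (PySem.List.pyGetD r 1 0) (n - 1) + 1) 1))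
      PySem.Set.empty
  (PySem.List.pyRange 0 n 1).filter
    (fun i => (PySem.List.pyGetD s1 i 0 != PySem.List.pyGetD s2 i 0) && !(PySem.Set.contains excluded i))

-- ===== PRECONDITION & SPEC =====
-- Pre_ excludes inputs containing an exclude range with fewer than two entries: A raises
-- IndexError there as soon as some differing index consults it (and B always raises there).
def Pre_get_diff_without_rand (s1 : List Int) (s2 : List Int) (exclude_ranges : List (List Int)) : Prop :=
  ∀ r ∈ exclude_ranges, 2 ≤ r.length
instance (s1 : List Int) (s2 : List Int) (exclude_ranges : List (List Int)) : Decidable (Pre_get_diff_without_rand s1 s2 exclude_ranges) := by unfold Pre_get_diff_without_rand; infer_instance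

def pvWitness_get_diff_without_rand : List Int × List Int × List (List Int) :=
  ([1, 2, 3], [1, 3, 7], [[0, 1]])

def Spec_get_diff_without_rand (s1 : List Int) (s2 : List Int) (exclude_ranges : List (List Int)) (out : List Int) : Prop := out = get_diff_without_rand_alt s1 s2 exclude_ranges
instance (s1 : List Int) (s2 : List Int) (exclude_ranges : List (List Int)) (out : List Int) : Decidable (Spec_get_diff_without_rand s1 s2 exclude_ranges out) := by unfold Spec_get_diff_without_rand; infer_instance

-- ===== CLAIM (what is proved, stated in full; the proofs are below) =====
def Claim_equal_get_diff_without_rand : Prop := ∀ (s1 : List Int) (s2 : List Int) (exclude_ranges : List (List Int)), Dom_get_diff_without_rand s1 s2 exclude_ranges → Pre_get_diff_without_rand s1 s2 exclude_ranges → Spec_get_diff_without_rand s1 s2 exclude_ranges (get_diff_without_rand s1 s2 exclude_ranges)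

-- ===== LEMMAS AND PROOFS =====

theorem int_xor_eq_zero_iff (a b : Int) : Int.xor a b = 0 ↔ a = b := by
  cases a <;> cases b <;>
    simp [Int.xor, Nat.xor_eq_zero_iff, Int.negSucc_eq] <;>
    constructor <;> intro h <;> omega

theorem mem_foldl_update {α β : Type} [BEq α] [LawfulBEq α]
    (l : List β) (g : β → List α) (s : PySem.Set α) (y : α) :
    y ∈ l.foldl (fun s r => PySem.Set.update s (g r)) s ↔ y ∈ s ∨ ∃ r ∈ l, y ∈ g r := by
  induction l generalizing s with
  | nil => simp
  | cons r l ih =>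
    simp only [List.foldl_cons, ih, PySem.Set.mem_update, List.mem_cons]
    aesop

theorem get_diff_without_rand_spec : Claim_equal_get_diff_without_rand := by
  intro s1 s2 ex _ hpre
  unfold Spec_get_diff_without_rand get_diff_without_rand get_diff_without_rand_alt
  simp only []
  set diff := (s1.zip s2).map (fun p => Int.xor p.1 p.2) with hdiff
  have hlen : (diff.length : Int) = min (s1.length : Int) (s2.length : Int) := by
    simp [hdiff, List.length_zip]
  rw [PySem.List.enumerate_eq_map_pyRange (d := 0), List.foldl_map]
  have hbody :
      (fun (acc : List Int) (j : Int) =>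
        if (PySem.List.pyGetD diff j 0) ≠ 0 then
          if ex.any (fun r => decide (PySem.List.pyGetD r 0 0 ≤ j) && decide (j ≤ PySem.List.pyGetD r 1 0)) then
            acc
          else acc ++ [j]
        else acc)
      = (fun acc j =>
          if ((PySem.List.pyGetD diff j 0) ≠ 0 ∧
              ¬ (ex.any (fun r => decide (PySem.List.pyGetD r 0 0 ≤ j) && decide (j ≤ PySem.List.pyGetD r 1 0)) = true)) then
            acc ++ [j]
          else acc) := by
    funext acc j
    split_ifs <;> tauto
  rw [hbody, PySem.List.foldl_append_ite_eq_filter]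
  rw [List.nil_append]
  simp only [PySem.List.len_eq]
  rw [hlen]
  apply List.filter_congr
  intro i hi
  have hmem := (PySem.List.mem_pyRange_one).1 hi
  obtain ⟨h0i, hin⟩ := hmem
  have h1 : i < (s1.length : Int) := lt_of_lt_of_le hin (by omega)
  have h2 : i < (s2.length : Int) := lt_of_lt_of_le hin (by omega)
  have hd : i < (diff.length : Int) := by omega
  -- the diff test
  have hget1 : PySem.List.pyGetD s1 i 0 = s1[i.toNat]'(by omega) :=
    PySem.List.pyGetD_eq_getElem s1 0 h0i h1
  have hget2 : PySem.List.pyGetD s2 i 0 = s2[i.toNat]'(by omega) :=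
    PySem.List.pyGetD_eq_getElem s2 0 h0i h2
  have hgetd : PySem.List.pyGetD diff i 0 = diff[i.toNat]'(by omega) :=
    PySem.List.pyGetD_eq_getElem diff 0 h0i hd
  have hdiffi : diff[i.toNat]'(by omega) =
      Int.xor (s1[i.toNat]'(by omega)) (s2[i.toNat]'(by omega)) := by
    simp [hdiff]
  -- the exclusion test
  have hexcl :
      (PySem.Set.contains
        (ex.foldl (fun s r => PySem.Set.update s
          (PySem.List.pyRange (max (PySem.List.pyGetD r 0 0) 0)
            (min (PySem.List.pyGetD r 1 0) (min (s1.length : Int) (s2.length : Int) - 1) + 1) 1))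
          PySem.Set.empty) i) =
      (ex.any (fun r => decide (PySem.List.pyGetD r 0 0 ≤ i) && decide (i ≤ PySem.List.pyGetD r 1 0))) := by
    rw [Bool.eq_iff_iff]
    rw [PySem.Set.contains_iff]
    rw [mem_foldl_update]
    simp only [PySem.Set.empty, List.not_mem_nil, false_or, List.any_eq_true,
      PySem.List.mem_pyRange_one, Bool.and_eq_true, decide_eq_true_eq]
    constructor
    · rintro ⟨r, hr, hlo, hhi⟩
      exact ⟨r, hr, by omega, by omega⟩
    · rintro ⟨r, hr, hlo, hhi⟩
      exact ⟨r, hr, by omega, by omega⟩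
  rw [hexcl]
  cases hany : (ex.any fun r => decide (PySem.List.pyGetD r 0 0 ≤ i) && decide (i ≤ PySem.List.pyGetD r 1 0)) <;>
    simp [hgetd, hdiffi, hget1, hget2, int_xor_eq_zero_iff, bne]
  rw [Bool.eq_iff_iff]; simp
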